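-- pv_equiv track=rewrite | github.com/Walker-Stephens/python-projects | dictionary_assignment.py | problem_sixteen
-- ===== SOURCE A (Python) =====
-- def problem_sixteen(string_list):
--     # Problem 16 code goes here:
--     dictionary = {}
--     for i in string_list:
--         if i not in dictionary:
--             dictionary[i] = 1
--         else: dictionary[i] = dictionary[i] + 1
--     for i in dictionary:
--         if dictionary[i] > 1:
--             dictionary[i] = True
--         else:
--             dictionary[i] = False
--
--
--     return dictionary
-- ===== SOURCE B (Python) =====
-- def problem_sixteen(string_list):
--     # Sort-based duplicate detection: no frequency tally and no value-rewriting
--     # pass.  A duplicated string shows up as an equal adjacent pair in the sorted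
--     # copy; the final comprehension keeps first-appearance key order (later
--     # duplicates overwrite with the same boolean).
--     ss = sorted(string_list)
--     dup = {a for a, b in zip(ss, ss[1:]) if a == b}
--     return {s: s in dup for s in string_list}
-- ===== Notes on version B (the rewrite author's own statement) =====
-- stated objective: alternative
-- what changed: Replaces the incremental frequency dict plus a second value-rewriting pass with sort-based duplicate detection (equal adjacent pairs in a sorted copy) and a single dict comprehension over the input.
import Mathlib
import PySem

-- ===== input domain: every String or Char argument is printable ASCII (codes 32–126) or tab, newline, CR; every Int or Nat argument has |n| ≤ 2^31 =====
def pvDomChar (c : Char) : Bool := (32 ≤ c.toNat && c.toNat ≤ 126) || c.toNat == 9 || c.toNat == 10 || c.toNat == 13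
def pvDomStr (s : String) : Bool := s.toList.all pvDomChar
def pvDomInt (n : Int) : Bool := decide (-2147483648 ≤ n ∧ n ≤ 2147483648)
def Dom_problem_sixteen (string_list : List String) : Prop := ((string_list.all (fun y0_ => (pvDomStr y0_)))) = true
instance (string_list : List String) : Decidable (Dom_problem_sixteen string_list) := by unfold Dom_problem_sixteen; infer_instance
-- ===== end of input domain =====

-- B drops A's integer frequency tally and its second value-rewriting pass: it sorts a
-- copy, reads duplicates off equal adjacent pairs, and builds the dict in one comprehension.

-- ===== PORT A =====
-- first loop: count occurrences; second loop rewrites each value, in key order, to (count > 1)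
-- loop body of the counting loop: 'if i not in dictionary: d[i]=1 else: d[i]=d[i]+1'
def pvAStep (d : PySem.Dict String Int) (i : String) : PySem.Dict String Int :=
  if d.contains i = false then d.insert i 1 else d.insert i (d.getD i 0 + 1)

def problem_sixteen (string_list : List String) : List (String × Bool) :=
  (string_list.foldl pvAStep PySem.Dict.empty).items.map (fun p => (p.1, decide (p.2 > 1)))

-- ===== PORT B =====
-- dup = {a for a, b in zip(ss, ss[1:]) if a == b}  on  ss = sorted(string_list)
def pvDup (string_list : List String) : PySem.Set String :=
  PySem.Set.ofList
    ((((PySem.List.sorted string_list (fun x => x) false).zip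
        (PySem.List.slice (PySem.List.sorted string_list (fun x => x) false) (some 1) none)).filter
      (fun p => p.1 == p.2)).map (fun p => p.1))

-- the dict comprehension: insert (s, s in dup) for every s, overwrite keeps position
def problem_sixteen_alt (string_list : List String) : List (String × Bool) :=
  (string_list.foldl
    (fun d s => d.insert s (PySem.Set.contains (pvDup string_list) s))
    PySem.Dict.empty).items

-- ===== PRECONDITION & SPEC =====
def Spec_problem_sixteen (string_list : List String) (out : List (String × Bool)) : Prop := out = problem_sixteen_alt string_list
instance (string_list : List String) (out : List (String × Bool)) : Decidable (Spec_problem_sixteen string_list out) := by unfold Spec_problem_sixteen; infer_instance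

-- ===== CLAIM (what is proved, stated in full; the proofs are below) =====
def Claim_equal_problem_sixteen : Prop := ∀ (string_list : List String), Dom_problem_sixteen string_list → Spec_problem_sixteen string_list (problem_sixteen string_list)

-- ===== LEMMAS AND PROOFS =====

-- A's counting loop IS collections.Counter: on a missing key, insert 1 = insert (getD + 1)
theorem aLoop_eq_counter (xs : List String) :
    xs.foldl pvAStep PySem.Dict.empty = PySem.Dict.counter xs := by
  rw [← PySem.Dict.foldl_insert_getD_add_one_eq_counter]
  congr 1
  funext d i
  unfold pvAStep
  by_cases h : d.contains i = false
  · rw [if_pos h, PySem.Dict.getD_of_not_contains d 0 h]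
    norm_num
  · rw [if_neg h]

-- the left components of the equal adjacent pairs of l
def pvAdjEq (l : List String) : List String :=
  ((l.zip (l.drop 1)).filter (fun p => p.1 == p.2)).map (fun p => p.1)

-- on a weakly increasing list, an equal adjacent pair at s is exactly a repeated s
theorem mem_pvAdjEq_iff (l : List String) (hp : l.Pairwise (· ≤ ·)) (s : String) :
    s ∈ pvAdjEq l ↔ 2 ≤ l.count s := by
  induction l with
  | nil => simp [pvAdjEq]
  | cons a t ih =>
    match t with
    | [] =>
      simp only [pvAdjEq, List.drop_succ_cons, List.drop_nil, List.zip_nil_right,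
        List.filter_nil, List.map_nil, List.not_mem_nil, false_iff, not_le]
      rcases eq_or_ne s a with h | h
      · simp [h]
      · simp [List.count_cons]
        split <;> omega
    | b :: t' =>
      have hp' : (b :: t').Pairwise (· ≤ ·) := hp.of_cons
      have hab : a ≤ b := (List.pairwise_cons.mp hp).1 b (by simp)
      have hstep : pvAdjEq (a :: b :: t')
          = (if a = b then [a] else []) ++ pvAdjEq (b :: t') := by
        simp only [pvAdjEq, List.drop_succ_cons, List.drop_zero, List.zip_cons_cons,
          List.filter_cons]
        by_cases h : a = b <;> simp [h]
      rw [hstep]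
      by_cases hsa : s = a
      · subst hsa
        by_cases h : s = b
        · subst h
          simp only [List.count_cons_self, List.mem_append]
          constructor
          · intro _; omega
          · intro _; simp
        · -- s = a ≠ b: s cannot occur again (sortedness), both sides false
          have hnot : s ∉ b :: t' := by
            intro hmem
            rcases List.mem_cons.mp hmem with h1 | hmem'
            · exact h h1
            · have hb_le : b ≤ s := (List.pairwise_cons.mp hp').1 s hmem'
              exact h (le_antisymm hab hb_le)
          have hc0 : (b :: t').count s = 0 := List.count_eq_zero.mpr hnot
          have hnd : s ∉ pvAdjEq (b :: t') := by
            intro hmem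
            exact hnot (List.count_pos_iff.mp (by have := (ih hp').mp hmem; omega))
          simp [h, hnd, hc0]
      · have hsa' : ¬a = s := fun hh => hsa hh.symm
        have hcount : (a :: b :: t').count s = (b :: t').count s := by
          simp [List.count_cons, hsa']
        rw [hcount, ← ih hp']
        have hhead : s ∉ (if a = b then [a] else ([] : List String)) := by
          split <;> simp [hsa]
        simp [List.mem_append, hhead]

-- membership in B's dup set is exactly "occurs more than once in the input"
theorem contains_pvDup (xs : List String) (s : String) :
    PySem.Set.contains (pvDup xs) s = decide (List.count s xs > 1) := by
  unfold pvDup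
  rw [PySem.List.slice_from _ (by norm_num : (0 : Int) ≤ 1)]
  have hmem : s ∈ pvAdjEq (PySem.List.sorted xs (fun x => x) false)
      ↔ 2 ≤ (PySem.List.sorted xs (fun x => x) false).count s :=
    mem_pvAdjEq_iff _ (PySem.List.sorted_pairwise xs (fun x => x)) s
  have hcount : (PySem.List.sorted xs (fun x => x) false).count s = xs.count s :=
    (PySem.List.sorted_perm xs (fun x => x) false).count_eq s
  have hfold : (((PySem.List.sorted xs (fun x => x) false).zip
      ((PySem.List.sorted xs (fun x => x) false).drop (Int.toNat 1))).filter
      (fun p => p.1 == p.2)).map (fun p => p.1)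
      = pvAdjEq (PySem.List.sorted xs (fun x => x) false) := rfl
  rw [hfold]
  by_cases hgt : 1 < List.count s xs
  · have hin : s ∈ pvAdjEq (PySem.List.sorted xs (fun x => x) false) :=
      hmem.mpr (by rw [hcount]; omega)
    simp [PySem.Set.contains, PySem.Set.mem_ofList, hin, hgt]
  · have hnin : s ∉ pvAdjEq (PySem.List.sorted xs (fun x => x) false) := fun hin =>
      hgt (by have := hmem.mp hin; rw [hcount] at this; omega)
    simp [PySem.Set.contains, PySem.Set.mem_ofList, hnin, hgt]

-- a fold inserting a key-determined constant value: lookup is that value on any key seen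
theorem getD_foldl_insert_const (v : String → Bool) (l : List String)
    (d : PySem.Dict String Bool) (k : String) (d0 : Bool) :
    (l.foldl (fun d s => d.insert s (v s)) d).getD k d0
      = if k ∈ l then v k else d.getD k d0 := by
  induction l using List.reverseRecOn with
  | nil => simp
  | append_singleton ys x ih =>
    rw [List.foldl_append, List.foldl_cons, List.foldl_nil, PySem.Dict.getD_insert, ih]
    by_cases hx : k = x
    · simp [hx]
    · simp [hx, List.mem_append]

-- B's dict comprehension, evaluated: first occurrences in order, each with count > 1
theorem b_eval (xs : List String) :
    problem_sixteen_alt xs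
      = (PySem.Set.ofList xs).map (fun s => (s, decide (List.count s xs > 1))) := by
  unfold problem_sixteen_alt
  have hnd : (xs.foldl (fun d s =>
      d.insert s (PySem.Set.contains (pvDup xs) s)) PySem.Dict.empty).keys.Nodup := by
    apply PySem.Dict.nodup_keys_foldl_insert
    simp [PySem.Dict.keys_empty]
  rw [PySem.Dict.items_eq_map_keys _ hnd false, PySem.Dict.keys_foldl_insert]
  have hkeys : PySem.Set.update (PySem.Dict.empty : PySem.Dict String Bool).keys xs
      = PySem.Set.ofList xs := rfl
  rw [hkeys]
  refine List.map_congr_left (fun s hs => ?_)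
  have hmem : s ∈ xs := (PySem.Set.mem_ofList xs s).mp hs
  rw [getD_foldl_insert_const, if_pos hmem, contains_pvDup]

-- ===== VERDICT (by name: the statement is the Claim_ definition above) =====
theorem problem_sixteen_spec : Claim_equal_problem_sixteen := by
  intro xs _
  unfold Spec_problem_sixteen
  rw [b_eval]
  unfold problem_sixteen
  rw [aLoop_eq_counter, PySem.Dict.items_counter, List.map_map]
  exact List.map_congr_left (fun s _ => by simp)
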